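-- pv_equiv track=rewrite | github.com/keerthirajsivashankar/My_Python_Solutions | Hard/3062.py | maximumValueSum
-- ===== SOURCE A (Python) =====
-- from typing import List
--
-- def maximumValueSum(
--
--     nums: List[int],
--     k: int,
--     edges: List[List[int]], # This parameter is present in the signature but not used in the logic.
-- ) -> int:
--   """
--   Calculates the maximum possible sum of elements in `nums` after
--   applying an XOR operation with `k` to some elements.
--   The goal is to maximize the sum, subject to an implicit constraint
--   (often related to graph parity) that leads to needing an even number of XOR operations.
--
--   Args:
--     nums: A list of integers.
--     k: The integer to XOR with.
--     edges: A list of edges. This parameter is present in the method signature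
--            but is not used in the provided implementation's logic.
--
--   Returns:
--     The maximum possible sum.
--   """
--
--   # Initial strategy: For each number, choose the maximum of (original num) or (num ^ k).
--   # This gives the absolute maximum sum if there were no parity constraints.
--   maxSum = sum(max(num, num ^ k) for num in nums)
--
--   # Count how many numbers actually increased their value by applying XOR with k.
--   # These are the numbers for which (num ^ k) > num.
--   changedCount = sum((num ^ k) > num for num in nums)
--
--   # If the count of numbers that benefited from XOR is even, then `maxSum` is valid.
--   # This is because we implicitly chose to XOR an even number of elements that increased their value.
--   if changedCount % 2 == 0:
--     return maxSum
--
--   # If `changedCount` is odd, we cannot achieve `maxSum` directly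
--   # because we need an even number of XOR operations (implied by the problem context
--   # that usually comes with this specific constraint, often related to tree properties).
--   #
--   # To satisfy the even parity, we must "undo" one XOR operation (if it increased value)
--   # or "add" one XOR operation (if it decreased value) to maintain the overall parity.
--   #
--   # We want to minimize the reduction from `maxSum`.
--   # This means we need to find the smallest absolute difference |num - (num ^ k)|.
--   #
--   # Case 1: We must "undo" one of the beneficial XOR operations.
--   #   This means we had `num ^ k` but now must use `num`. The loss is `(num ^ k) - num`.
--   #
--   # Case 2: We must "add" an XOR operation to a number that previously preferred `num`.
--   #   This means we had `num` but now must use `num ^ k`. The loss is `num - (num ^ k)`.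
--   #   Note: If `num ^ k` was smaller, then `num - (num ^ k)` is positive, representing a reduction.
--   #
--   # In both cases, the *cost* or *reduction* from `maxSum` is `abs(num - (num ^ k))`.
--   # We choose the minimum such reduction.
--   minChangeDiff = float('inf') # Initialize with a very large value
--
--   for num in nums:
--       # Calculate the absolute difference between num and num ^ k.
--       # This represents the "cost" of toggling the XOR state for this number
--       # from its locally optimal choice to the other state, to satisfy parity.
--       diff = abs(num - (num ^ k))
--       minChangeDiff = min(minChangeDiff, diff)
--
--   return maxSum - minChangeDiff
-- ===== SOURCE B (Python) =====
-- def maximumValueSum(nums, k, edges):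
--     # One-pass two-state DP: best sum using an even / odd number of XOR flips.
--     even, odd = 0, None  # odd state unreachable before any element
--     for num in nums:
--         g = num ^ k
--         if odd is None:
--             even, odd = even + num, even + g
--         else:
--             even, odd = max(even + num, odd + g), max(even + g, odd + num)
--     return even
-- ===== Notes on version B (the rewrite author's own statement) =====
-- stated objective: alternative
-- what changed: Replaces A's three passes (greedy max-sum, beneficial-flip count, then a separate min-difference pass to repair odd parity) with a single-pass two-state dynamic program tracking the best sum with an even and with an odd number of flips.
import Mathlib
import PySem

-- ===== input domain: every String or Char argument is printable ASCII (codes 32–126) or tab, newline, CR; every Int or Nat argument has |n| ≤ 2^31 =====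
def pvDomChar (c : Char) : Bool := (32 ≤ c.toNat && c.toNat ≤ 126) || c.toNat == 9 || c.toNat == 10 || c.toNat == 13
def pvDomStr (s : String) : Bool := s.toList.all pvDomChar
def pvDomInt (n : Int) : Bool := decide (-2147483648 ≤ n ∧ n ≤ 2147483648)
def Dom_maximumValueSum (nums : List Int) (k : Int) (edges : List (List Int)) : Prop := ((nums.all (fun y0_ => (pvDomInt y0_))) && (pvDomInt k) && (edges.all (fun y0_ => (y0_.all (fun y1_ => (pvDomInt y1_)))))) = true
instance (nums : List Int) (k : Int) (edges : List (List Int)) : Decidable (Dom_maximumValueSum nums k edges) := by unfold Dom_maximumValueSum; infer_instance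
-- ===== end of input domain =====

-- B is a one-pass two-state DP (even/odd flip parity) replacing A's three-pass greedy-plus-parity-fix; same O(n) cost (objective: alternative).

-- ===== PORT A =====
-- literal transliteration of A: greedy sum, beneficial-flip count, parity check, min-difference repair.
-- float('inf') is modelled as Option Int (none = inf); the `none` branch of the final match is the
-- Python expression `maxSum - inf`, reachable only when nums = [] and changedCount is odd, i.e. never.
def maximumValueSum (nums : List Int) (k : Int) (edges : List (List Int)) : Int :=
  let maxSum := nums.foldl (fun acc num => acc + max num (PySem.Int.bxor num k)) 0
  let changedCount := nums.foldl (fun acc num => acc + (if num < PySem.Int.bxor num k then (1:Int) else 0)) 0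
  if changedCount % 2 = 0 then maxSum
  else
    let minChangeDiff := nums.foldl
      (fun acc num =>
        let diff := |num - PySem.Int.bxor num k|
        some (match acc with | none => diff | some m => min m diff)) (none : Option Int)
    match minChangeDiff with
    | none => maxSum            -- unreachable: changedCount odd forces nums ≠ []
    | some m => maxSum - m

-- ===== PORT B =====
-- B-side helper: one DP step over the state (best-even-sum, best-odd-sum-if-reachable)
def altStep (k : Int) (st : Int × Option Int) (num : Int) : Int × Option Int :=
  let g := PySem.Int.bxor num k
  match st.2 with
  | none => (st.1 + num, some (st.1 + g))
  | some o => (max (st.1 + num) (o + g), some (max (st.1 + g) (o + num)))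

def maximumValueSum_alt (nums : List Int) (k : Int) (edges : List (List Int)) : Int :=
  (nums.foldl (altStep k) ((0 : Int), (none : Option Int))).1

-- ===== PRECONDITION & SPEC =====
def Spec_maximumValueSum (nums : List Int) (k : Int) (edges : List (List Int)) (out : Int) : Prop := out = maximumValueSum_alt nums k edges
instance (nums : List Int) (k : Int) (edges : List (List Int)) (out : Int) : Decidable (Spec_maximumValueSum nums k edges out) := by unfold Spec_maximumValueSum; infer_instance

-- ===== CLAIM (what is proved, stated in full; the proofs are below) =====
def Claim_equal_maximumValueSum : Prop := ∀ (nums : List Int) (k : Int) (edges : List (List Int)), Dom_maximumValueSum nums k edges → Spec_maximumValueSum nums k edges (maximumValueSum nums k edges)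

-- ===== LEMMAS AND PROOFS =====

-- Names for A's three folds (definitionally the folds inside the port of A)
def pvS (k : Int) (xs : List Int) : Int :=
  xs.foldl (fun acc num => acc + max num (PySem.Int.bxor num k)) 0
def pvC (k : Int) (xs : List Int) : Int :=
  xs.foldl (fun acc num => acc + (if num < PySem.Int.bxor num k then (1:Int) else 0)) 0
def pvM (k : Int) (xs : List Int) : Option Int :=
  xs.foldl
    (fun acc num =>
      let diff := |num - PySem.Int.bxor num k|
      some (match acc with | none => diff | some m => min m diff)) (none : Option Int)

theorem pvS_snoc (k : Int) (xs : List Int) (x : Int) :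
    pvS k (xs ++ [x]) = pvS k xs + max x (PySem.Int.bxor x k) := by
  simp [pvS, List.foldl_append]

theorem pvC_snoc (k : Int) (xs : List Int) (x : Int) :
    pvC k (xs ++ [x]) = pvC k xs + (if x < PySem.Int.bxor x k then (1:Int) else 0) := by
  simp [pvC, List.foldl_append]

theorem pvM_snoc (k : Int) (xs : List Int) (x : Int) :
    pvM k (xs ++ [x]) =
      some (match pvM k xs with
            | none => |x - PySem.Int.bxor x k|
            | some m => min m (|x - PySem.Int.bxor x k|)) := by
  simp [pvM, List.foldl_append]

-- The DP invariant: the fold state of B is determined by A's three aggregates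
theorem pvInv (k : Int) (xs : List Int) :
    (xs = [] ∧ xs.foldl (altStep k) ((0:Int), (none : Option Int)) = (0, none)) ∨
    (∃ m, pvM k xs = some m ∧ 0 ≤ m ∧
      ((pvC k xs % 2 = 0 ∧
          xs.foldl (altStep k) ((0:Int), (none : Option Int)) = (pvS k xs, some (pvS k xs - m))) ∨
       (pvC k xs % 2 ≠ 0 ∧
          xs.foldl (altStep k) ((0:Int), (none : Option Int)) = (pvS k xs - m, some (pvS k xs))))) := by
  induction xs using List.reverseRecOn with
  | nil => left; exact ⟨rfl, rfl⟩
  | append_singleton xs x ih =>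
    right
    have hfold : (xs ++ [x]).foldl (altStep k) ((0:Int), (none : Option Int)) =
        altStep k (xs.foldl (altStep k) ((0:Int), (none : Option Int))) x := by
      simp [List.foldl_append]
    have hS := pvS_snoc k xs x
    have hC := pvC_snoc k xs x
    rcases lt_or_ge x (PySem.Int.bxor x k) with hcmp | hcmp
    · -- XOR increases x
      have habs : |x - PySem.Int.bxor x k| = PySem.Int.bxor x k - x := by
        rw [abs_of_nonpos (by omega)]; ring
      rw [if_pos hcmp] at hC
      rcases ih with ⟨hnil, hst⟩ | ⟨m, hM, hm0, hcase⟩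
      · subst hnil
        refine ⟨PySem.Int.bxor x k - x, ?_, by omega, Or.inr ⟨?_, ?_⟩⟩
        · rw [pvM_snoc]; simp [pvM, habs]
        · rw [hC]; simp only [pvC, List.foldl_nil]; omega
        · rw [hfold, hst, hS]
          simp only [pvS, List.foldl_nil, altStep, Prod.mk.injEq, Option.some.injEq]
          constructor <;> omega
      · refine ⟨min m (|x - PySem.Int.bxor x k|), ?_, ?_, ?_⟩
        · rw [pvM_snoc, hM]
        · rw [habs]; omega
        · rw [habs] at *
          rcases hcase with ⟨hpar, hst⟩ | ⟨hpar, hst⟩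
          · exact Or.inr ⟨by omega, by
              rw [hfold, hst, hS]
              simp only [altStep, Prod.mk.injEq, Option.some.injEq]
              constructor <;> omega⟩
          · exact Or.inl ⟨by omega, by
              rw [hfold, hst, hS]
              simp only [altStep, Prod.mk.injEq, Option.some.injEq]
              constructor <;> omega⟩
    · -- XOR does not increase x
      have habs : |x - PySem.Int.bxor x k| = x - PySem.Int.bxor x k :=
        abs_of_nonneg (by omega)
      rw [if_neg (by omega)] at hC
      rcases ih with ⟨hnil, hst⟩ | ⟨m, hM, hm0, hcase⟩
      · subst hnil
        refine ⟨x - PySem.Int.bxor x k, ?_, by omega, Or.inl ⟨?_, ?_⟩⟩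
        · rw [pvM_snoc]; simp [pvM, habs]
        · rw [hC]; simp only [pvC, List.foldl_nil]; omega
        · rw [hfold, hst, hS]
          simp only [pvS, List.foldl_nil, altStep, Prod.mk.injEq, Option.some.injEq]
          constructor <;> omega
      · refine ⟨min m (|x - PySem.Int.bxor x k|), ?_, ?_, ?_⟩
        · rw [pvM_snoc, hM]
        · rw [habs]; omega
        · rw [habs] at *
          rcases hcase with ⟨hpar, hst⟩ | ⟨hpar, hst⟩
          · exact Or.inl ⟨by omega, by
              rw [hfold, hst, hS]
              simp only [altStep, Prod.mk.injEq, Option.some.injEq]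
              constructor <;> omega⟩
          · exact Or.inr ⟨by omega, by
              rw [hfold, hst, hS]
              simp only [altStep, Prod.mk.injEq, Option.some.injEq]
              constructor <;> omega⟩

theorem pvA_closed (nums : List Int) (k : Int) (edges : List (List Int)) :
    maximumValueSum nums k edges =
      if pvC k nums % 2 = 0 then pvS k nums
      else match pvM k nums with
           | none => pvS k nums
           | some m => pvS k nums - m := rfl

-- ===== VERDICT (by name: the statement is the Claim_ definition above) =====
theorem maximumValueSum_spec : Claim_equal_maximumValueSum := by
  intro nums k edges _
  unfold Spec_maximumValueSum maximumValueSum_alt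
  rw [pvA_closed nums k edges]
  rcases pvInv k nums with ⟨hnil, hst⟩ | ⟨m, hM, _, hcase⟩
  · subst hnil
    rw [hst]; simp [pvC, pvS]
  · rcases hcase with ⟨hpar, hst⟩ | ⟨hpar, hst⟩
    · rw [if_pos hpar, hst]
    · rw [if_neg hpar, hM, hst]
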